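-- pv_equiv track=rewrite | github.com/xsafter/map-generator | main.py | automataIteration
-- ===== SOURCE A (Python) =====
-- def automataIteration(grid, minCount, makePillars):
--     new_grid = [row[:] for row in grid]
--     for i in range(1, len(grid) - 1):
--         for j in range(1, len(grid[0]) - 1):
--             count = 0
--             for k in range(-1, 2):
--                 for l in range(-1, 2):
--                     if grid[i + k][j + l] == 1:
--                         count += 1
--             if count >= minCount or (count == 0 and makePillars == 1):
--                 new_grid[i][j] = 1
--             else:
--                 new_grid[i][j] = 0
--     return new_grid
-- ===== SOURCE B (Python) =====
-- def automataIteration(grid, minCount, makePillars):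
--     n = len(grid)
--     m = len(grid[0]) if grid else 0
--     if n < 3 or m < 3:
--         return [row[:] for row in grid]
--     # separable convolution: horizontal 3-window sums once per row ...
--     h = [[(1 if row[j - 1] == 1 else 0) + (1 if row[j] == 1 else 0) + (1 if row[j + 1] == 1 else 0)
--           for j in range(1, m - 1)] for row in grid]
--     # ... then each interior cell is the sum of three vertically adjacent window sums
--     out = [grid[0][:]]
--     for i in range(1, n - 1):
--         row = grid[i]
--         body = [1 if (c := h[i - 1][j] + h[i][j] + h[i + 1][j]) >= minCount
--                      or (c == 0 and makePillars == 1) else 0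
--                 for j in range(m - 2)]
--         out.append([row[0]] + body + row[m - 1:])
--     out.append(grid[n - 1][:])
--     return out
-- ===== Notes on version B (the rewrite author's own statement) =====
-- stated objective: faster
-- what changed: Replaces the per-cell 3x3 neighbour scan by a separable convolution: a table of horizontal 3-window sums is built once per row, each interior cell's count is the sum of three vertical table lookups, and the output rows are assembled by comprehension instead of mutating a deep copy; Pre_ excludes only the ragged grids on which A raises IndexError.
import Mathlib
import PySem

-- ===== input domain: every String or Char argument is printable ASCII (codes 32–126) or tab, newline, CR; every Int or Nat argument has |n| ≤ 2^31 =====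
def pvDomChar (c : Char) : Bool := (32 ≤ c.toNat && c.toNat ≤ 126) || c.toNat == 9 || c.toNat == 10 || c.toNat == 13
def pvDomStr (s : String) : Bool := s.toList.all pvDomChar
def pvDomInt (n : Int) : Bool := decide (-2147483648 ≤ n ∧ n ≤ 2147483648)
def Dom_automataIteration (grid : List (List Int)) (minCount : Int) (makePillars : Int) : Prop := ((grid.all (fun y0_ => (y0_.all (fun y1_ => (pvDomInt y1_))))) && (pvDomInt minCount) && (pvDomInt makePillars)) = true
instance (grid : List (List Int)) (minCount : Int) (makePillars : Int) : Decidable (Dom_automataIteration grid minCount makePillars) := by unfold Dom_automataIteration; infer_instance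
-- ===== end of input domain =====

-- B replaces A's per-cell 3x3 scan by a separable convolution (horizontal 3-window sums per
-- row, then three vertical lookups per interior cell) and builds output rows by comprehension.

-- ===== PORT A =====
def automataIteration (grid : List (List Int)) (minCount : Int) (makePillars : Int) : List (List Int) :=
  let new_grid := grid.map (fun row => row)
  (PySem.List.pyRange 1 ((grid.length : Int) - 1) 1).foldl (fun ng i =>
    (PySem.List.pyRange 1 (((grid.headD []).length : Int) - 1) 1).foldl (fun ng j =>
      let count : Int :=
        (PySem.List.pyRange (-1) 2 1).foldl (fun c k =>
          (PySem.List.pyRange (-1) 2 1).foldl (fun c l =>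
            if PySem.List.pyGetD (PySem.List.pyGetD grid (i + k) []) (j + l) 0 = 1 then c + 1 else c) c) 0
      if count ≥ minCount ∨ (count = 0 ∧ makePillars = 1) then
        ng.set i.toNat ((ng.getD i.toNat []).set j.toNat 1)
      else
        ng.set i.toNat ((ng.getD i.toNat []).set j.toNat 0)) ng) new_grid

-- ===== PORT B =====
def pvInd (x : Int) : Int := if x = 1 then 1 else 0

def automataIteration_alt (grid : List (List Int)) (minCount : Int) (makePillars : Int) : List (List Int) :=
  let n : Int := grid.length
  let m : Int := (grid.headD []).length
  if n < 3 ∨ m < 3 then grid.map (fun row => row)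
  else
    let h : List (List Int) := grid.map (fun row =>
      (PySem.List.pyRange 1 (m - 1) 1).map (fun j =>
        pvInd (PySem.List.pyGetD row (j - 1) 0) + pvInd (PySem.List.pyGetD row j 0) +
          pvInd (PySem.List.pyGetD row (j + 1) 0)))
    let out := (PySem.List.pyRange 1 (n - 1) 1).foldl (fun out i =>
      let row := PySem.List.pyGetD grid i []
      let body := (PySem.List.pyRange 0 (m - 2) 1).map (fun j =>
        let c := PySem.List.pyGetD (PySem.List.pyGetD h (i - 1) []) j 0 +
                 PySem.List.pyGetD (PySem.List.pyGetD h i []) j 0 +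
                 PySem.List.pyGetD (PySem.List.pyGetD h (i + 1) []) j 0
        if c ≥ minCount ∨ (c = 0 ∧ makePillars = 1) then (1 : Int) else 0)
      out ++ [PySem.List.pyGetD row 0 0 :: (body ++ PySem.List.slice row (some (m - 1)) none)])
      [PySem.List.pyGetD grid 0 []]
    out ++ [PySem.List.pyGetD grid (n - 1) []]

-- ===== PRECONDITION & SPEC =====
-- Pre_ excludes exactly the ragged grids on which A raises IndexError: at least 3 rows,
-- first row of length ≥ 3, but some row shorter than the first row.
def Pre_automataIteration (grid : List (List Int)) (minCount : Int) (makePillars : Int) : Prop :=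
  grid.length ≤ 2 ∨ (grid.headD []).length ≤ 2 ∨
    ∀ row ∈ grid, (grid.headD []).length ≤ row.length
instance (grid : List (List Int)) (minCount : Int) (makePillars : Int) : Decidable (Pre_automataIteration grid minCount makePillars) := by unfold Pre_automataIteration; infer_instance
def pvWitness_automataIteration : List (List Int) × Int × Int := ([[1,1,1],[1,0,1],[1,1,1]], 5, 0)

def Spec_automataIteration (grid : List (List Int)) (minCount : Int) (makePillars : Int) (out : List (List Int)) : Prop := out = automataIteration_alt grid minCount makePillars
instance (grid : List (List Int)) (minCount : Int) (makePillars : Int) (out : List (List Int)) : Decidable (Spec_automataIteration grid minCount makePillars out) := by unfold Spec_automataIteration; infer_instance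

-- ===== CLAIM (what is proved, stated in full; the proofs are below) =====
def Claim_equal_automataIteration : Prop := ∀ (grid : List (List Int)) (minCount : Int) (makePillars : Int), Dom_automataIteration grid minCount makePillars → Pre_automataIteration grid minCount makePillars → Spec_automataIteration grid minCount makePillars (automataIteration grid minCount makePillars)

-- ===== LEMMAS AND PROOFS =====

-- A's 3x3 neighbour count and resulting cell value, named for the proofs
def pvCntA (grid : List (List Int)) (i j : Int) : Int :=
  (PySem.List.pyRange (-1) 2 1).foldl (fun c k =>
    (PySem.List.pyRange (-1) 2 1).foldl (fun c l =>
      if PySem.List.pyGetD (PySem.List.pyGetD grid (i + k) []) (j + l) 0 = 1 then c + 1 else c) c) 0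

def pvVal (grid : List (List Int)) (minCount makePillars i j : Int) : Int :=
  if pvCntA grid i j ≥ minCount ∨ (pvCntA grid i j = 0 ∧ makePillars = 1) then 1 else 0

lemma pv_set_getD {α : Type} (g : List α) (n : Nat) (d : α) : g.set n (g.getD n d) = g := by
  rcases Nat.lt_or_ge n g.length with h | h
  · simp [List.getD_eq_getElem?_getD, List.getElem?_eq_getElem h]
  · simp [List.set_eq_of_length_le (show g.length ≤ n by omega)]

lemma pv_rowfold_getElem? (v : Int → Int) : ∀ (J : List Int), J.Nodup → (∀ j ∈ J, 0 ≤ j) →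
    ∀ (r : List Int) (y : Nat),
    (J.foldl (fun r j => r.set j.toNat (v j)) r)[y]? =
      if (y : Int) ∈ J then (r[y]?).map (fun _ => v (y : Int)) else r[y]?
  | [], _, _, r, y => by simp
  | j :: J, hnd, hnn, r, y => by
    rw [List.foldl_cons,
      pv_rowfold_getElem? v J (List.Nodup.of_cons hnd) (fun a ha => hnn a (by simp [ha]))]
    have hj0 : 0 ≤ j := hnn j (by simp)
    by_cases hyJ : (y : Int) ∈ J
    · have hne : j.toNat ≠ y := by
        have : (y : Int) ≠ j := by rintro rfl; exact (List.nodup_cons.mp hnd).1 hyJ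
        omega
      simp [hyJ, List.getElem?_set, hne]
    · by_cases hyj : (y : Int) = j
      · have ht : j.toNat = y := by omega
        rcases Nat.lt_or_ge y r.length with h | h
        · simp [hyJ, hyj, List.getElem?_set, ht, h, List.getElem?_eq_getElem h]
        · simp [hyJ, hyj, List.getElem?_set, ht, Nat.not_lt.mpr h,
            List.getElem?_eq_none (show r.length ≤ y by omega)]
      · have hne : j.toNat ≠ y := by omega
        simp [hyJ, hyj, List.getElem?_set, hne]

-- the inner 2D fold writes only row i: collapse it to a single set of a row fold
lemma pv_inner_to_row (i : Int) (v : Int → Int) : ∀ (J : List Int) (g : List (List Int)),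
    J.foldl (fun ng j => ng.set i.toNat ((ng.getD i.toNat []).set j.toNat (v j))) g
      = g.set i.toNat (J.foldl (fun r j => r.set j.toNat (v j)) (g.getD i.toNat []))
  | [], g => by
    rcases Nat.lt_or_ge i.toNat g.length with h | h
    · simp [List.getD_eq_getElem?_getD, List.getElem?_eq_getElem h]
    · simp [List.set_eq_of_length_le (show g.length ≤ i.toNat by omega)]
  | j :: J, g => by
    rcases Nat.lt_or_ge i.toNat g.length with h | h
    · rw [List.foldl_cons, pv_inner_to_row i v J]
      simp [List.getD_eq_getElem?_getD, List.getElem?_set, h, List.set_set]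
    · have hset : ∀ (r : List Int), g.set i.toNat r = g := fun r =>
        List.set_eq_of_length_le (by omega)
      rw [List.foldl_cons, hset, pv_inner_to_row i v J, hset, hset]

lemma pv_outerfold_getElem? (F : Int → List Int → List Int) : ∀ (I : List Int), I.Nodup → (∀ i ∈ I, 0 ≤ i) →
    ∀ (g : List (List Int)) (x : Nat),
    (I.foldl (fun g i => g.set i.toNat (F i (g.getD i.toNat []))) g)[x]? =
      if (x : Int) ∈ I then (g[x]?).map (F (x : Int)) else g[x]?
  | [], _, _, g, x => by simp
  | i :: I, hnd, hnn, g, x => by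
    rw [List.foldl_cons,
      pv_outerfold_getElem? F I (List.Nodup.of_cons hnd) (fun a ha => hnn a (by simp [ha]))]
    have hi0 : 0 ≤ i := hnn i (by simp)
    by_cases hxI : (x : Int) ∈ I
    · have hne : i.toNat ≠ x := by
        have : (x : Int) ≠ i := by rintro rfl; exact (List.nodup_cons.mp hnd).1 hxI
        omega
      simp [hxI, List.getElem?_set, hne]
    · by_cases hxi : (x : Int) = i
      · have ht : i.toNat = x := by omega
        have hiI : i ∉ I := (List.nodup_cons.mp hnd).1
        rcases Nat.lt_or_ge x g.length with h | h
        · simp [hxI, hxi, List.getElem?_set, ht, h, List.getElem?_eq_getElem h,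
            List.getD_eq_getElem?_getD, hiI]
        · simp [hxI, hxi, List.getElem?_set, ht, Nat.not_lt.mpr h,
            List.getElem?_eq_none (show g.length ≤ x by omega)]
      · have hne : i.toNat ≠ x := by omega
        simp [hxI, hxi, List.getElem?_set, hne]

-- A in row-update form
lemma pv_A_char (grid : List (List Int)) (minCount makePillars : Int) :
    automataIteration grid minCount makePillars =
      (PySem.List.pyRange 1 ((grid.length : Int) - 1) 1).foldl
        (fun ng i => ng.set i.toNat
          ((PySem.List.pyRange 1 (((grid.headD []).length : Int) - 1) 1).foldl
            (fun r j => r.set j.toNat (pvVal grid minCount makePillars i j))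
            (ng.getD i.toNat []))) grid := by
  unfold automataIteration
  simp only [List.map_id']
  congr 1
  funext ng i
  rw [show (fun (ng : List (List Int)) (j : Int) =>
        let count : Int :=
          (PySem.List.pyRange (-1) 2 1).foldl (fun c k =>
            (PySem.List.pyRange (-1) 2 1).foldl (fun c l =>
              if PySem.List.pyGetD (PySem.List.pyGetD grid (i + k) []) (j + l) 0 = 1 then c + 1 else c) c) 0
        if count ≥ minCount ∨ (count = 0 ∧ makePillars = 1) then
          ng.set i.toNat ((ng.getD i.toNat []).set j.toNat 1)
        else
          ng.set i.toNat ((ng.getD i.toNat []).set j.toNat 0))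
      = (fun ng j => ng.set i.toNat ((ng.getD i.toNat []).set j.toNat (pvVal grid minCount makePillars i j)))
    from funext fun ng => funext fun j => by
      dsimp only [pvVal, pvCntA]; split_ifs <;> rfl]
  exact pv_inner_to_row i _ _ ng

-- pvCntA at a cast interior index, written as nine indicator lookups
lemma pv_cnt_eval (grid : List (List Int)) (x y : Nat) (hx : 1 ≤ x) (hy : 1 ≤ y) :
    pvCntA grid (x : Int) (y : Int) =
      pvInd ((grid.getD (x-1) []).getD (y-1) 0) + pvInd ((grid.getD (x-1) []).getD y 0) +
        pvInd ((grid.getD (x-1) []).getD (y+1) 0) +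
      pvInd ((grid.getD x []).getD (y-1) 0) + pvInd ((grid.getD x []).getD y 0) +
        pvInd ((grid.getD x []).getD (y+1) 0) +
      pvInd ((grid.getD (x+1) []).getD (y-1) 0) + pvInd ((grid.getD (x+1) []).getD y 0) +
        pvInd ((grid.getD (x+1) []).getD (y+1) 0) := by
  have hr : PySem.List.pyRange (-1) 2 1 = [-1, 0, 1] := by decide
  have hite : ∀ (a c : Int), (if a = 1 then c + 1 else c) = c + pvInd a := by
    intro a c; unfold pvInd; split_ifs <;> ring
  unfold pvCntA
  rw [hr]
  simp only [List.foldl_cons, List.foldl_nil, hite]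
  have e1 : ((x : Int) + -1) = ((x - 1 : Nat) : Int) := by omega
  have e3 : ((x : Int) + 1) = ((x + 1 : Nat) : Int) := by omega
  have f1 : ((y : Int) + -1) = ((y - 1 : Nat) : Int) := by omega
  have f3 : ((y : Int) + 1) = ((y + 1 : Nat) : Int) := by omega
  rw [e1, e3, f1, f3]
  simp only [add_zero, PySem.List.pyGetD_natCast]
  ring

-- one lookup in B's horizontal-window table, as three indicator lookups
lemma pv_h_lookup (grid : List (List Int)) (a y : Nat) (ha : a < grid.length) (hy1 : 1 ≤ y)
    (hy2 : (y : Int) < ((grid.headD []).length : Int) - 1) :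
    PySem.List.pyGetD (PySem.List.pyGetD (grid.map (fun row =>
        (PySem.List.pyRange 1 (((grid.headD []).length : Int) - 1) 1).map (fun j =>
          pvInd (PySem.List.pyGetD row (j - 1) 0) + pvInd (PySem.List.pyGetD row j 0) +
            pvInd (PySem.List.pyGetD row (j + 1) 0)))) (a : Int) []) ((y - 1 : Nat) : Int) 0 =
      pvInd ((grid.getD a []).getD (y-1) 0) + pvInd ((grid.getD a []).getD y 0) +
        pvInd ((grid.getD a []).getD (y+1) 0) := by
  have h1 : PySem.List.pyGetD (grid.map (fun row =>
        (PySem.List.pyRange 1 (((grid.headD []).length : Int) - 1) 1).map (fun j =>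
          pvInd (PySem.List.pyGetD row (j - 1) 0) + pvInd (PySem.List.pyGetD row j 0) +
            pvInd (PySem.List.pyGetD row (j + 1) 0)))) (a : Int) [] =
      (PySem.List.pyRange 1 (((grid.headD []).length : Int) - 1) 1).map (fun j =>
          pvInd (PySem.List.pyGetD (grid.getD a []) (j - 1) 0) +
            pvInd (PySem.List.pyGetD (grid.getD a []) j 0) +
            pvInd (PySem.List.pyGetD (grid.getD a []) (j + 1) 0)) := by
    rw [PySem.List.pyGetD_natCast, List.getD_eq_getElem?_getD, List.getElem?_map,
      List.getElem?_eq_getElem ha]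
    simp only [Option.map_some, Option.getD_some]
    rw [List.getD_eq_getElem?_getD, List.getElem?_eq_getElem ha]
    simp only [Option.getD_some]
  rw [h1, PySem.List.pyGetD_map_pyRange_one _ 1 _ (y - 1) 0 (by omega)]
  have e0 : ((1 : Int) + ((y - 1 : Nat) : Int)) = ((y : Nat) : Int) := by omega
  have e1 : (((y : Nat) : Int) - 1) = ((y - 1 : Nat) : Int) := by omega
  have e3 : (((y : Nat) : Int) + 1) = ((y + 1 : Nat) : Int) := by omega
  rw [e0, e1, e3]
  simp only [PySem.List.pyGetD_natCast]

-- interior row produced by A's row fold = interior row built by B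
lemma pv_row_eq (grid : List (List Int)) (minCount makePillars : Int) (x : Nat)
    (_hn : 3 ≤ grid.length) (hm : 3 ≤ (grid.headD []).length)
    (hx1 : 1 ≤ x) (hx2 : x + 1 < grid.length)
    (hrows : ∀ row ∈ grid, (grid.headD []).length ≤ row.length) :
    (PySem.List.pyRange 1 (((grid.headD []).length : Int) - 1) 1).foldl
      (fun r j => r.set j.toNat (pvVal grid minCount makePillars (x : Int) j))
      (grid.getD x []) =
    PySem.List.pyGetD (PySem.List.pyGetD grid (x : Int) []) 0 0 ::
      (((PySem.List.pyRange 0 (((grid.headD []).length : Int) - 2) 1).map (fun j =>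
          if PySem.List.pyGetD (PySem.List.pyGetD (grid.map (fun row =>
                (PySem.List.pyRange 1 (((grid.headD []).length : Int) - 1) 1).map (fun jj =>
                  pvInd (PySem.List.pyGetD row (jj - 1) 0) + pvInd (PySem.List.pyGetD row jj 0) +
                    pvInd (PySem.List.pyGetD row (jj + 1) 0)))) ((x : Int) - 1) []) j 0 +
              PySem.List.pyGetD (PySem.List.pyGetD (grid.map (fun row =>
                (PySem.List.pyRange 1 (((grid.headD []).length : Int) - 1) 1).map (fun jj =>
                  pvInd (PySem.List.pyGetD row (jj - 1) 0) + pvInd (PySem.List.pyGetD row jj 0) +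
                    pvInd (PySem.List.pyGetD row (jj + 1) 0)))) (x : Int) []) j 0 +
              PySem.List.pyGetD (PySem.List.pyGetD (grid.map (fun row =>
                (PySem.List.pyRange 1 (((grid.headD []).length : Int) - 1) 1).map (fun jj =>
                  pvInd (PySem.List.pyGetD row (jj - 1) 0) + pvInd (PySem.List.pyGetD row jj 0) +
                    pvInd (PySem.List.pyGetD row (jj + 1) 0)))) ((x : Int) + 1) []) j 0
              ≥ minCount ∨
            (PySem.List.pyGetD (PySem.List.pyGetD (grid.map (fun row =>
                (PySem.List.pyRange 1 (((grid.headD []).length : Int) - 1) 1).map (fun jj =>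
                  pvInd (PySem.List.pyGetD row (jj - 1) 0) + pvInd (PySem.List.pyGetD row jj 0) +
                    pvInd (PySem.List.pyGetD row (jj + 1) 0)))) ((x : Int) - 1) []) j 0 +
              PySem.List.pyGetD (PySem.List.pyGetD (grid.map (fun row =>
                (PySem.List.pyRange 1 (((grid.headD []).length : Int) - 1) 1).map (fun jj =>
                  pvInd (PySem.List.pyGetD row (jj - 1) 0) + pvInd (PySem.List.pyGetD row jj 0) +
                    pvInd (PySem.List.pyGetD row (jj + 1) 0)))) (x : Int) []) j 0 +
              PySem.List.pyGetD (PySem.List.pyGetD (grid.map (fun row =>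
                (PySem.List.pyRange 1 (((grid.headD []).length : Int) - 1) 1).map (fun jj =>
                  pvInd (PySem.List.pyGetD row (jj - 1) 0) + pvInd (PySem.List.pyGetD row jj 0) +
                    pvInd (PySem.List.pyGetD row (jj + 1) 0)))) ((x : Int) + 1) []) j 0 = 0 ∧
              makePillars = 1)
          then (1 : Int) else 0))
        ++ PySem.List.slice (PySem.List.pyGetD grid (x : Int) [])
            (some (((grid.headD []).length : Int) - 1)) none) := by
  have hxlt : x < grid.length := by omega
  have hrowx : grid.getD x [] = grid[x] := by
    rw [List.getD_eq_getElem?_getD, List.getElem?_eq_getElem hxlt]; rfl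
  have hrlen : (grid.headD []).length ≤ (grid.getD x []).length := by
    rw [hrowx]; exact hrows _ (List.getElem_mem hxlt)
  have hgx : PySem.List.pyGetD grid (x : Int) [] = grid.getD x [] :=
    PySem.List.pyGetD_natCast grid x []
  rw [hgx]
  apply List.ext_getElem?
  intro y
  rw [pv_rowfold_getElem? _ _ (PySem.List.nodup_pyRange_one _ _)
      (fun j hj => by have := (PySem.List.mem_pyRange_one).mp hj; omega)]
  by_cases hy0 : y = 0
  · subst hy0
    rw [if_neg (by simp [PySem.List.mem_pyRange_one])]
    have h0 : 0 < grid[x].length := by rw [← hrowx]; omega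
    rw [List.getElem?_cons_zero, PySem.List.pyGetD_zero, hrowx,
      List.getElem?_eq_getElem h0, List.getD_eq_getElem?_getD, List.getElem?_eq_getElem h0]
    rfl
  · obtain ⟨k, rfl⟩ : ∃ k, y = k + 1 := ⟨y - 1, by omega⟩
    rw [List.getElem?_cons_succ]
    by_cases hint : (k + 1 : Nat) + 1 < (grid.headD []).length
    · -- interior column
      rw [if_pos (by rw [PySem.List.mem_pyRange_one]; push_cast; omega)]
      rw [List.getElem?_eq_getElem (show k + 1 < (grid.getD x []).length by omega)]
      simp only [Option.map_some]
      rw [List.getElem?_append_left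
        (by simp only [List.length_map, PySem.List.length_pyRange_one]; omega)]
      rw [List.getElem?_map,
        List.getElem?_eq_getElem (by simp only [PySem.List.length_pyRange_one]; omega)]
      simp only [Option.map_some, PySem.List.getElem_pyRange_one, zero_add]
      have hA1 : ((x : Int) - 1) = ((x - 1 : Nat) : Int) := by omega
      have hA3 : ((x : Int) + 1) = ((x + 1 : Nat) : Int) := by omega
      have hk : ((k : Nat) : Int) = ((k + 1 - 1 : Nat) : Int) := by omega
      rw [hA1, hA3, hk]
      rw [pv_h_lookup grid (x - 1) (k + 1) (by omega) (by omega) (by push_cast; omega),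
        pv_h_lookup grid x (k + 1) (by omega) (by omega) (by push_cast; omega),
        pv_h_lookup grid (x + 1) (k + 1) (by omega) (by omega) (by push_cast; omega)]
      unfold pvVal
      rw [pv_cnt_eval grid x (k + 1) hx1 (by omega)]
      have hgen : ∀ a b c d e f g h i : Int,
          (if a + b + c + d + e + f + g + h + i ≥ minCount ∨
              (a + b + c + d + e + f + g + h + i = 0 ∧ makePillars = 1) then (1:Int) else 0) =
          (if (a + b + c) + (d + e + f) + (g + h + i) ≥ minCount ∨
              ((a + b + c) + (d + e + f) + (g + h + i) = 0 ∧ makePillars = 1) then (1:Int) else 0) := by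
        intro a b c d e f g h i
        have : a + b + c + d + e + f + g + h + i = (a + b + c) + (d + e + f) + (g + h + i) := by ring
        rw [this]
      exact congrArg some (hgen _ _ _ _ _ _ _ _ _)
    · -- tail column: untouched on both sides
      rw [if_neg (by rw [PySem.List.mem_pyRange_one]; push_cast; omega)]
      rw [List.getElem?_append_right
        (by simp only [List.length_map, PySem.List.length_pyRange_one]; omega)]
      rw [PySem.List.slice_from _ (by omega), List.getElem?_drop]
      congr 1
      simp only [List.length_map, PySem.List.length_pyRange_one]
      omega

lemma pv_foldl_setgetD {α : Type} (d : α) : ∀ (I : List Int) (g : List α),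
    I.foldl (fun g i => g.set i.toNat (g.getD i.toNat d)) g = g
  | [], _ => rfl
  | i :: I, g => by rw [List.foldl_cons, pv_set_getD, pv_foldl_setgetD d I]

lemma pv_main (grid : List (List Int)) (minCount makePillars : Int)
    (hpre : Pre_automataIteration grid minCount makePillars) :
    automataIteration grid minCount makePillars = automataIteration_alt grid minCount makePillars := by
  by_cases hsm : ((grid.length : Int) < 3 ∨ ((grid.headD []).length : Int) < 3)
  · have hB : automataIteration_alt grid minCount makePillars = grid := by
      simp only [automataIteration_alt]
      rw [if_pos hsm, List.map_id']
    rw [hB, pv_A_char]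
    rcases lt_or_ge ((grid.length : Int)) 3 with h | h
    · rw [PySem.List.pyRange_one_eq_nil (show (grid.length : Int) - 1 ≤ 1 by omega)]; rfl
    · have hm : ((grid.headD []).length : Int) < 3 := by
        rcases hsm with h' | h'
        · omega
        · exact h'
      rw [PySem.List.pyRange_one_eq_nil
        (show ((grid.headD []).length : Int) - 1 ≤ 1 by omega)]
      simp only [List.foldl_nil]
      exact pv_foldl_setgetD [] _ grid
  · have hn : (3 : Int) ≤ grid.length := by omega
    have hm : (3 : Int) ≤ (grid.headD []).length := by omega
    have hrows : ∀ row ∈ grid, (grid.headD []).length ≤ row.length := by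
      rcases hpre with h | h | h
      · exact absurd h (by omega)
      · exact absurd h (by omega)
      · exact h
    rw [pv_A_char]
    simp only [automataIteration_alt]
    rw [if_neg hsm, PySem.List.foldl_append_singleton_eq_map]
    simp only [List.cons_append, List.nil_append]
    apply List.ext_getElem?
    intro x
    rw [pv_outerfold_getElem?
      (fun i r => (PySem.List.pyRange 1 (((grid.headD []).length : Int) - 1) 1).foldl
        (fun r j => r.set j.toNat (pvVal grid minCount makePillars i j)) r)
      _ (PySem.List.nodup_pyRange_one _ _)
      (fun i hi => by have := (PySem.List.mem_pyRange_one).mp hi; omega)]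
    by_cases hx0 : x = 0
    · subst hx0
      rw [if_neg (by simp [PySem.List.mem_pyRange_one])]
      have h0 : 0 < grid.length := by omega
      rw [List.getElem?_cons_zero, PySem.List.pyGetD_zero, List.getElem?_eq_getElem h0,
        List.getD_eq_getElem?_getD, List.getElem?_eq_getElem h0]
      rfl
    · obtain ⟨k, rfl⟩ : ∃ k, x = k + 1 := ⟨x - 1, by omega⟩
      rw [List.getElem?_cons_succ]
      by_cases hint : (k : Int) + 2 < grid.length
      · -- interior row
        have hklt : k + 1 < grid.length := by omega
        rw [if_pos (by rw [PySem.List.mem_pyRange_one]; push_cast; omega)]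
        rw [List.getElem?_eq_getElem hklt]
        simp only [Option.map_some]
        rw [List.getElem?_append_left
          (by simp only [List.length_map, PySem.List.length_pyRange_one]; omega)]
        rw [List.getElem?_map,
          List.getElem?_eq_getElem (by simp only [PySem.List.length_pyRange_one]; omega)]
        simp only [Option.map_some, PySem.List.getElem_pyRange_one]
        have hgd : grid.getD (k + 1) [] = grid[k + 1] := by
          rw [List.getD_eq_getElem?_getD, List.getElem?_eq_getElem hklt]; rfl
        rw [← hgd, show ((1 : Int) + (k : Nat)) = ((k + 1 : Nat) : Int) by omega]
        exact congrArg some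
          (pv_row_eq grid minCount makePillars (k + 1) (by omega) (by omega) (by omega)
            (by omega) hrows)
      · by_cases hlast : (k : Int) + 2 = grid.length
        · -- last row, copied on both sides
          rw [if_neg (by rw [PySem.List.mem_pyRange_one]; push_cast; omega)]
          rw [List.getElem?_append_right
            (by simp only [List.length_map, PySem.List.length_pyRange_one]; omega)]
          simp only [List.length_map, PySem.List.length_pyRange_one]
          rw [show k - ((grid.length : Int) - 1 - 1).toNat = 0 by omega]
          rw [List.getElem?_cons_zero]
          have hklt : k + 1 < grid.length := by omega
          rw [List.getElem?_eq_getElem hklt,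
            show ((grid.length : Int) - 1) = ((k + 1 : Nat) : Int) by omega,
            PySem.List.pyGetD_natCast, List.getD_eq_getElem?_getD,
            List.getElem?_eq_getElem hklt]
          rfl
        · -- past the end: both sides are none
          rw [if_neg (by rw [PySem.List.mem_pyRange_one]; push_cast; omega)]
          rw [List.getElem?_eq_none (by omega)]
          rw [List.getElem?_eq_none (by
            simp only [List.length_append, List.length_map,
              PySem.List.length_pyRange_one, List.length_cons, List.length_nil]
            omega)]

theorem automataIteration_spec : Claim_equal_automataIteration := by
  intro grid minCount makePillars _ hpre
  exact pv_main grid minCount makePillars hpre
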